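-- pv_equiv track=rewrite | github.com/nj094m/football-bfs | app.py | get_new_connection_results_list
-- ===== SOURCE A (Python) =====
-- from typing import List, Dict
--
-- def get_new_connection_results_list( connection_result_list: List[str], crest_url_dict: Dict[str, str]) -> List[str]:
--     new_teams_keys = list(crest_url_dict.keys())[::-1]
--     new_connection_result_list = []
--     for idx, item in enumerate(connection_result_list):
--         if idx % 2 != 0:
--             new_connection_result_list.append(new_teams_keys.pop())
--         else:
--             new_connection_result_list.append(item)
--     return new_connection_result_list
-- ===== SOURCE B (Python) =====
-- def get_new_connection_results_list(connection_result_list, crest_url_dict):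
--     keys = list(crest_url_dict.keys())
--     result = []
--     i = 0
--     while i + 1 < len(connection_result_list):
--         result.append(connection_result_list[i])
--         result.append(keys[i // 2])
--         i += 2
--     if i < len(connection_result_list):
--         result.append(connection_result_list[i])
--     return result
-- ===== Notes on version B (the rewrite author's own statement) =====
-- stated objective: alternative
-- what changed: Instead of A's parity-branching scan over enumerate that consumes a reversed copy of the key list via pop(), B walks the list two elements at a time with a stride-2 index, copying each even-index item and writing keys[i//2] directly after it — no reversal, no parity test, no mutation of the key list.
import Mathlib
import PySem

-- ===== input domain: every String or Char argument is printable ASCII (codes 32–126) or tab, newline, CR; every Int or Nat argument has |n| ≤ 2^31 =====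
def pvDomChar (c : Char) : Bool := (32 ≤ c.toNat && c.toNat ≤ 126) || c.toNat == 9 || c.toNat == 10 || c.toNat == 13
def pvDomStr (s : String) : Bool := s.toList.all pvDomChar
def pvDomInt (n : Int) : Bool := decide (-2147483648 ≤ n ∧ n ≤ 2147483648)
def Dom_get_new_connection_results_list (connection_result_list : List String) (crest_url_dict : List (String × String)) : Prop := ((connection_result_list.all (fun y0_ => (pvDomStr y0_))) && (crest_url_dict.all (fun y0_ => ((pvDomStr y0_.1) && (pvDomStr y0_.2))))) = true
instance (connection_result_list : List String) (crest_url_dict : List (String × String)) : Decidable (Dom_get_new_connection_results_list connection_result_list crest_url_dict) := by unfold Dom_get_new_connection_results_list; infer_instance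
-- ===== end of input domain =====

-- B replaces A's full parity-branching scan (over a reversed key list consumed by pop())
-- with a two-at-a-time stride loop that copies each even-index item and writes keys[i//2]
-- directly after it — no reversal, no parity test, no pop. Objective: simpler/alternative.

-- ===== PORT A =====
-- list(crest_url_dict.keys())[::-1] is the reverse of the dict's key list
-- (PySem.List.slice?_none_none_neg_one); the loop is a fold over enumerate with state
-- (new_teams_keys, new_connection_result_list).  new_teams_keys.pop() is
-- PySem.List.pop? … (-1); its none case is Python's IndexError, excluded by Pre_.
def get_new_connection_results_list (connection_result_list : List String) (crest_url_dict : List (String × String)) : List String :=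
  let new_teams_keys := ((PySem.Dict.ofList crest_url_dict).keys).reverse
  let st := (PySem.List.enumerate connection_result_list 0).foldl
    (fun (st : List String × List String) p =>
      if PySem.Int.mod p.1 2 ≠ 0 then
        match PySem.List.pop? st.1 (-1) with
        | some (v, rest) => (rest, st.2 ++ [v])
        | none => (st.1, st.2)       -- Python raises IndexError here (outside Pre_)
      else (st.1, st.2 ++ [p.2]))
    (new_teams_keys, [])
  st.2

-- ===== PORT B =====
-- the while loop of Source B: i strides by 2, so it is structural recursion two elements at
-- a time with j = i // 2; keys[j] is a getD (its out-of-range case is Python's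
-- IndexError, excluded by Pre_).
def pvAltGo (xs : List String) (keys : List String) (j : Nat) : List String :=
  match xs with
  | a :: _ :: rest => a :: keys.getD j "" :: pvAltGo rest keys (j + 1)
  | [a] => [a]
  | [] => []

def get_new_connection_results_list_alt (connection_result_list : List String) (crest_url_dict : List (String × String)) : List String :=
  pvAltGo connection_result_list ((PySem.Dict.ofList crest_url_dict).keys) 0

-- ===== PRECONDITION & SPEC =====
-- Pre_ is exactly where the Python A returns: it pops one key per odd index, i.e. it
-- needs len(list)//2 keys; with fewer keys A (and B) raise IndexError.
def Pre_get_new_connection_results_list (connection_result_list : List String) (crest_url_dict : List (String × String)) : Prop :=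
  connection_result_list.length / 2 ≤ ((PySem.Dict.ofList crest_url_dict).keys).length
instance (connection_result_list : List String) (crest_url_dict : List (String × String)) : Decidable (Pre_get_new_connection_results_list connection_result_list crest_url_dict) := by unfold Pre_get_new_connection_results_list; infer_instance

def pvWitness_get_new_connection_results_list : List String × (List (String × String)) :=
  (["a", "x", "b", "y"], [("k1", "u1"), ("k2", "u2")])

def Spec_get_new_connection_results_list (connection_result_list : List String) (crest_url_dict : List (String × String)) (out : List String) : Prop := out = get_new_connection_results_list_alt connection_result_list crest_url_dict
instance (connection_result_list : List String) (crest_url_dict : List (String × String)) (out : List String) : Decidable (Spec_get_new_connection_results_list connection_result_list crest_url_dict out) := by unfold Spec_get_new_connection_results_list; infer_instance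

-- ===== CLAIM (what is proved, stated in full; the proofs are below) =====
def Claim_equal_get_new_connection_results_list : Prop := ∀ (connection_result_list : List String) (crest_url_dict : List (String × String)), Dom_get_new_connection_results_list connection_result_list crest_url_dict → Pre_get_new_connection_results_list connection_result_list crest_url_dict → Spec_get_new_connection_results_list connection_result_list crest_url_dict (get_new_connection_results_list connection_result_list crest_url_dict)

-- ===== LEMMAS AND PROOFS =====

-- proof-side two-at-a-time interleaving that both loops compute
def pvInter (xs ks : List String) : List String :=
  match xs, ks with
  | a :: _ :: rest, k :: ks' => a :: k :: pvInter rest ks'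
  | a :: _ :: rest, [] => a :: "" :: pvInter rest []
  | [a], _ => [a]
  | [], _ => []

lemma pvAltGo_eq_pvInter (xs ks : List String) (j : Nat)
    (h : j + xs.length / 2 ≤ ks.length) :
    pvAltGo xs ks j = pvInter xs (ks.drop j) := by
  induction xs, j using pvAltGo.induct with
  | case1 j a b rest ih =>
    have hj : j < ks.length := by simp at h; omega
    have hdrop : ks.drop j = ks[j] :: ks.drop (j + 1) :=
      List.drop_eq_getElem_cons hj
    have hgd : ks.getD j "" = ks[j] := by
      simp [List.getD_eq_getElem?_getD, List.getElem?_eq_getElem hj]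
    simp only [pvAltGo, pvInter, hdrop, hgd]
    exact congrArg (fun t => a :: ks[j] :: t) (ih (by simp at h ⊢; omega))
  | case2 j a => simp [pvAltGo, pvInter]
  | case3 j => simp [pvAltGo, pvInter]

lemma pvLoopA (xs ks acc : List String) (s : Int) (hs : s % 2 = 0)
    (h : xs.length / 2 ≤ ks.length) :
    ((PySem.List.enumerate xs s).foldl
      (fun (st : List String × List String) p =>
        if PySem.Int.mod p.1 2 ≠ 0 then
          match PySem.List.pop? st.1 (-1) with
          | some (v, rest) => (rest, st.2 ++ [v])
          | none => (st.1, st.2)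
        else (st.1, st.2 ++ [p.2]))
      (ks.reverse, acc)).2 = acc ++ pvInter xs ks := by
  induction xs, ks using pvInter.induct generalizing acc s with
  | case1 a b rest k ks' ih =>
    have hmod0 : ¬ (PySem.Int.mod s 2 ≠ 0) := by
      rw [PySem.Int.mod_eq_emod_of_pos (by norm_num)]; omega
    have hmod1 : PySem.Int.mod (s + 1) 2 ≠ 0 := by
      rw [PySem.Int.mod_eq_emod_of_pos (by norm_num)]; omega
    have hpop : PySem.List.pop? ((k :: ks').reverse) (-1) = some (k, ks'.reverse) := by
      have hrev : (k :: ks').reverse = ks'.reverse ++ [k] := by simp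
      rw [hrev, PySem.List.pop?_last]
    rw [PySem.List.enumerate_cons, PySem.List.enumerate_cons]
    simp only [List.foldl_cons, if_neg hmod0, if_pos hmod1, hpop]
    rw [ih (acc ++ [a] ++ [k]) (s + 1 + 1) (by omega) (by simp at h ⊢; omega)]
    simp [pvInter]
  | case2 a b rest ih =>
    exfalso; simp at h
  | case3 ks a =>
    have hmod0 : ¬ (PySem.Int.mod s 2 ≠ 0) := by
      rw [PySem.Int.mod_eq_emod_of_pos (by norm_num)]; omega
    rw [PySem.List.enumerate_cons, PySem.List.enumerate_nil]
    simp only [List.foldl_cons, List.foldl_nil, if_neg hmod0]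
    simp [pvInter]
  | case4 ks =>
    rw [PySem.List.enumerate_nil]
    simp [pvInter]

-- ===== VERDICT (by name: the statement is the Claim_ definition above) =====
theorem get_new_connection_results_list_spec : Claim_equal_get_new_connection_results_list := by
  intro l d _ hpre
  unfold Spec_get_new_connection_results_list
  unfold get_new_connection_results_list get_new_connection_results_list_alt
  rw [pvAltGo_eq_pvInter _ _ 0 (by simpa using hpre)]
  simpa using pvLoopA l ((PySem.Dict.ofList d).keys) [] 0 (by norm_num) hpre
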